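-- pv_equiv track=rewrite | github.com/Kambole21/student-information-system | app/routes/ca.py | number_assessment_types
-- ===== SOURCE A (Python) =====
-- def number_assessment_types(breakdown):
--     """Add numbers to duplicate assessment types (Quiz 1, Quiz 2, etc.)"""
--     type_count = {}
--     numbered_breakdown = []
--
--     for item in breakdown:
--         assessment_type = item.get('type', 'assignment')
--         if assessment_type in type_count:
--             type_count[assessment_type] += 1
--         else:
--             type_count[assessment_type] = 1
--
--         numbered_item = item.copy()
--         if type_count[assessment_type] > 1:
--             numbered_item['display_type'] = f"{assessment_type} {type_count[assessment_type]}"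
--         else:
--             numbered_item['display_type'] = assessment_type
--
--         numbered_breakdown.append(numbered_item)
--
--     return numbered_breakdown
-- ===== SOURCE B (Python) =====
-- def number_assessment_types(breakdown):
--     """Add numbers to duplicate assessment types (Quiz 1, Quiz 2, etc.)"""
--     groups = {}
--     for i, item in enumerate(breakdown):
--         groups.setdefault(item.get('type', 'assignment'), []).append((i, item))
--     result = [None] * len(breakdown)
--     for t, occurrences in groups.items():
--         for k, (i, item) in enumerate(occurrences, 1):
--             numbered = item.copy()
--             numbered['display_type'] = t if k == 1 else f"{t} {k}"
--             result[i] = numbered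
--     return result
-- ===== Notes on version B (the rewrite author's own statement) =====
-- stated objective: alternative
-- what changed: Replaces A's single pass with a running per-type counter dict by a two-stage group-and-scatter algorithm: first group the (index, item) occurrences by assessment type into a dict, then for each group write the k-th occurrence's numbered copy into a pre-sized result list at its original position.
import Mathlib
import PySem

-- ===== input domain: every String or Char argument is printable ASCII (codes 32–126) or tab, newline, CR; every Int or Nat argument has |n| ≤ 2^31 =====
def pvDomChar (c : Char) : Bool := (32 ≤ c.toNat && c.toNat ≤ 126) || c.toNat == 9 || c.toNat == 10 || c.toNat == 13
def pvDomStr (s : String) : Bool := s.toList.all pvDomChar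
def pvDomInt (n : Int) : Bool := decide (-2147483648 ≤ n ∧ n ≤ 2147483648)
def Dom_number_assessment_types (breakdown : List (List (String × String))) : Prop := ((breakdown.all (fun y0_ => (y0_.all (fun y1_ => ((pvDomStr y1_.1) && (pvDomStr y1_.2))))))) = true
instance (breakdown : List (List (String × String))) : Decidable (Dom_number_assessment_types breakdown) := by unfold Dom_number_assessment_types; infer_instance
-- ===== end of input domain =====

-- B replaces A's one-pass running type-counter by a group-by-type pass followed by positional writes into a pre-sized result; objective: alternative (same values, no speed claim).

-- ===== PORT A =====
def number_assessment_types (breakdown : List (List (String × String))) : List (List (String × String)) :=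
  (breakdown.foldl
    (fun (st : PySem.Dict String Int × List (List (String × String))) itemL =>
      let item : PySem.Dict String String := PySem.Dict.ofList itemL
      let t : String := item.getD "type" "assignment"
      let tc : PySem.Dict String Int :=
        if st.1.contains t then st.1.insert t (st.1.getD t 0 + 1) else st.1.insert t 1
      let numbered : PySem.Dict String String :=
        if tc.getD t 0 > 1 then item.insert "display_type" (t ++ " " ++ PySem.Int.toStr (tc.getD t 0))
        else item.insert "display_type" t
      (tc, st.2 ++ [numbered.items]))
    (PySem.Dict.empty, [])).2

-- ===== PORT B =====
-- B-side helpers: item.get('type','assignment') and the numbered copy item | {'display_type': …}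
def pvType (itemL : List (String × String)) : String :=
  (PySem.Dict.ofList itemL).getD "type" "assignment"

def pvOut (t : String) (k : Int) (itemL : List (String × String)) : List (String × String) :=
  ((PySem.Dict.ofList itemL).insert "display_type"
    (if k = 1 then t else t ++ " " ++ PySem.Int.toStr k)).items

-- groups.setdefault(t, []).append((i, item)) is ported as insert of the extended list
-- (Dict.insert overwrites in place, so the key order matches Python's setdefault);
-- result = [None]*n is ported as replicate n [] — every slot is overwritten, and the
-- write index i.toNat is exact since enumerate indices are ≥ 0.
def number_assessment_types_alt (breakdown : List (List (String × String))) : List (List (String × String)) :=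
  let groups : PySem.Dict String (List (Int × List (String × String))) :=
    (PySem.List.enumerate breakdown).foldl
      (fun g p => g.insert (pvType p.2) (g.getD (pvType p.2) [] ++ [p]))
      PySem.Dict.empty
  groups.items.foldl
    (fun res tp =>
      (PySem.List.enumerate tp.2 1).foldl
        (fun res kp => res.set kp.2.1.toNat (pvOut tp.1 kp.1 kp.2.2))
        res)
    (List.replicate breakdown.length [])

-- ===== PRECONDITION & SPEC =====
def Spec_number_assessment_types (breakdown : List (List (String × String))) (out : List (List (String × String))) : Prop := out = number_assessment_types_alt breakdown
instance (breakdown : List (List (String × String))) (out : List (List (String × String))) : Decidable (Spec_number_assessment_types breakdown out) := by unfold Spec_number_assessment_types; infer_instance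

-- ===== CLAIM (what is proved, stated in full; the proofs are below) =====
def Claim_equal_number_assessment_types : Prop := ∀ (breakdown : List (List (String × String))), Dom_number_assessment_types breakdown → Spec_number_assessment_types breakdown (number_assessment_types breakdown)

-- ===== LEMMAS AND PROOFS =====

-- reference recursion: item-by-item numbering, `pre` = types of the already-processed prefix
def pvSpine (pre : List String) : List (List (String × String)) → List (List (String × String))
  | [] => []
  | itemL :: rest =>
    pvOut (pvType itemL) ((pre.count (pvType itemL) : Int) + 1) itemL
      :: pvSpine (pre ++ [pvType itemL]) rest

-- canonical write list: (original index, numbered item) in original order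
def pvWr (pre : List String) (i : Nat) : List (List (String × String)) → List (Nat × List (String × String))
  | [] => []
  | itemL :: rest =>
    (i, pvOut (pvType itemL) ((pre.count (pvType itemL) : Int) + 1) itemL)
      :: pvWr (pre ++ [pvType itemL]) (i + 1) rest

-- the writes one group (t, occurrences) produces
def pvW (tp : String × List (Int × List (String × String))) : List (Nat × List (String × String)) :=
  (PySem.List.enumerate tp.2 1).map (fun kp => (kp.2.1.toNat, pvOut tp.1 kp.1 kp.2.2))

-- the grouping fold of port B
def pvG (breakdown : List (List (String × String))) : PySem.Dict String (List (Int × List (String × String))) :=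
  (PySem.List.enumerate breakdown).foldl
    (fun g p => g.insert (pvType p.2) (g.getD (pvType p.2) [] ++ [p]))
    PySem.Dict.empty

theorem pvA_fold (rest : List (List (String × String))) :
    ∀ (pre : List String) (tc : PySem.Dict String Int) (acc : List (List (String × String))),
    (∀ s, tc.getD s 0 = (pre.count s : Int)) →
    (∀ s, tc.contains s = decide (s ∈ pre)) →
    (rest.foldl
      (fun (st : PySem.Dict String Int × List (List (String × String))) itemL =>
        let item : PySem.Dict String String := PySem.Dict.ofList itemL
        let t : String := item.getD "type" "assignment"
        let tc : PySem.Dict String Int :=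
          if st.1.contains t then st.1.insert t (st.1.getD t 0 + 1) else st.1.insert t 1
        let numbered : PySem.Dict String String :=
          if tc.getD t 0 > 1 then item.insert "display_type" (t ++ " " ++ PySem.Int.toStr (tc.getD t 0))
          else item.insert "display_type" t
        (tc, st.2 ++ [numbered.items]))
      (tc, acc)).2 = acc ++ pvSpine pre rest := by
  induction rest with
  | nil => intro pre tc acc _ _; simp [pvSpine]
  | cons itemL rest ih =>
    intro pre tc acc h1 h2
    simp only [List.foldl_cons]
    have htp : pvType itemL = (PySem.Dict.ofList itemL).getD "type" "assignment" := rfl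
    set t := (PySem.Dict.ofList itemL).getD "type" "assignment" with ht
    by_cases hmem : t ∈ pre
    · have hc : tc.contains t = true := by rw [h2]; simp [hmem]
      have hcount : 1 ≤ pre.count t := List.one_le_count_iff.mpr hmem
      have hn : (tc.insert t (tc.getD t 0 + 1)).getD t 0 = (pre.count t : Int) + 1 := by
        rw [PySem.Dict.getD_insert_self, h1]
      simp only [hc, if_true, hn]
      rw [ih (pre ++ [t]) (tc.insert t (tc.getD t 0 + 1)) _ ?_ ?_]
      · simp only [pvSpine, htp, pvOut]
        have hgt : (pre.count t : Int) + 1 > 1 := by omega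
        rw [if_pos hgt]
        have hk : ¬ ((pre.count t : Int) + 1 = 1) := by omega
        rw [if_neg hk]
        simp
      · intro s
        rw [PySem.Dict.getD_insert]
        by_cases hs : s = t
        · subst hs; simp [h1, List.count_append]
        · simp [hs, h1, List.count_append, Ne.symm hs]
      · intro s
        rw [PySem.Dict.contains_insert, h2]
        by_cases hs : s = t
        · subst hs; simp
        · simp [hs, List.mem_append]
    · have hc : tc.contains t = false := by rw [h2]; simp [hmem]
      have hcount : pre.count t = 0 := List.count_eq_zero.mpr hmem
      have hn : (tc.insert t 1).getD t 0 = 1 := PySem.Dict.getD_insert_self _ _ _ _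
      simp only [hc, if_false, Bool.false_eq_true, hn]
      rw [ih (pre ++ [t]) (tc.insert t 1) _ ?_ ?_]
      · simp only [pvSpine, htp, pvOut, hcount]
        have hgt : ¬ ((1 : Int) > 1) := by omega
        rw [if_neg hgt]
        simp
      · intro s
        rw [PySem.Dict.getD_insert]
        by_cases hs : s = t
        · subst hs; simp [hcount, List.count_append]
        · simp [hs, h1, List.count_append, Ne.symm hs]
      · intro s
        rw [PySem.Dict.contains_insert, h2]
        by_cases hs : s = t
        · subst hs; simp
        · simp [hs, List.mem_append]

theorem pvB_writes (breakdown : List (List (String × String))) :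
    number_assessment_types_alt breakdown =
      ((pvG breakdown).items.flatMap pvW).foldl
        (fun res w => res.set w.1 w.2) (List.replicate breakdown.length []) := by
  unfold number_assessment_types_alt
  rw [List.foldl_flatMap]
  show ((pvG breakdown).items.foldl _ _) = _
  congr 1
  funext res tp
  simp only [pvW, List.foldl_map]

theorem pvG_snoc (b : List (List (String × String))) (x : List (String × String)) :
    pvG (b ++ [x]) = (pvG b).insert (pvType x)
      ((pvG b).getD (pvType x) [] ++ [((b.length : Int), x)]) := by
  unfold pvG
  rw [PySem.List.enumerate_append, List.foldl_append]
  simp [PySem.List.enumerate_cons, PySem.List.enumerate_nil]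

theorem pvG_keys (b : List (List (String × String))) :
    (pvG b).keys = PySem.Set.ofList (b.map pvType) := by
  unfold pvG
  rw [PySem.Dict.keys_foldl_insert_key (PySem.List.enumerate b)
    (fun p => pvType p.2) (fun g p => g.getD (pvType p.2) [] ++ [p]) PySem.Dict.empty]
  have : (PySem.List.enumerate b).map (fun p => pvType p.2)
      = b.map pvType := by
    rw [show (fun (p : Int × List (String × String)) => pvType p.2)
        = pvType ∘ (·.2) from rfl, ← List.map_map, PySem.List.map_snd_enumerate]
  rw [this]
  rfl

theorem pvG_nodup_keys (b : List (List (String × String))) : (pvG b).keys.Nodup := by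
  rw [pvG_keys]; exact PySem.Set.nodup_ofList _

theorem pvG_contains (b : List (List (String × String))) (t : String) :
    (pvG b).contains t = decide (t ∈ b.map pvType) := by
  rw [PySem.Dict.contains_eq_decide_mem_keys, pvG_keys]
  simp [PySem.Set.mem_ofList]

theorem pvG_len (b : List (List (String × String))) :
    ∀ t, ((pvG b).getD t []).length = (b.map pvType).count t := by
  induction b using List.reverseRecOn with
  | nil => intro t; simp [pvG, PySem.List.enumerate_nil, PySem.Dict.getD_empty]
  | append_singleton b x ih =>
    intro t
    rw [pvG_snoc, PySem.Dict.getD_insert]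
    by_cases hs : t = pvType x
    · subst hs; simp [ih, List.count_append]
    · simp [hs, ih, List.count_append, Ne.symm hs]

theorem pvWr_append (x : List (String × String)) (rest : List (List (String × String))) :
    ∀ (pre : List String) (i : Nat),
    pvWr pre i (rest ++ [x]) = pvWr pre i rest ++
      [(i + rest.length, pvOut (pvType x)
        (((pre ++ rest.map pvType).count (pvType x) : Int) + 1) x)] := by
  induction rest with
  | nil => intro pre i; simp [pvWr]
  | cons y rest ih =>
    intro pre i
    simp only [List.cons_append, pvWr, ih, List.length_cons, List.map_cons]
    have h1 : i + 1 + rest.length = i + (rest.length + 1) := by omega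
    have h2 : pre ++ [pvType y] ++ rest.map pvType = pre ++ pvType y :: rest.map pvType := by simp
    rw [h1, h2]

theorem pvW_snoc (t : String) (occ : List (Int × List (String × String)))
    (p : Int × List (String × String)) :
    pvW (t, occ ++ [p]) = pvW (t, occ) ++ [(p.1.toNat, pvOut t (1 + (occ.length : Int)) p.2)] := by
  unfold pvW
  rw [show (t, occ ++ [p]).2 = occ ++ [p] from rfl, PySem.List.enumerate_append]
  simp [PySem.List.enumerate_cons, PySem.List.enumerate_nil]

theorem pvG_perm (breakdown : List (List (String × String))) :
    ((pvG breakdown).items.flatMap pvW).Perm (pvWr [] 0 breakdown) := by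
  induction breakdown using List.reverseRecOn with
  | nil => simp [pvG, PySem.List.enumerate_nil, pvWr, PySem.Dict.empty]
  | append_singleton b x ih =>
    rw [pvG_snoc, pvWr_append]
    simp only [List.nil_append, Nat.zero_add]
    set t := pvType x with htx
    set old := (pvG b).getD t [] with hold
    set w : Nat × List (String × String) :=
      (b.length, pvOut t (((b.map pvType).count t : Int) + 1) x) with hw
    by_cases hc : (pvG b).contains t
    · -- t already a key: its group is extended in place
      have hv : (pvG b).get? t = some old := by
        rw [PySem.Dict.contains_eq_isSome_get?] at hc
        cases hg : (pvG b).get? t with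
        | none => rw [hg] at hc; simp at hc
        | some v =>
          have hov : old = v := by
            rw [hold]; exact PySem.Dict.getD_of_get?_eq_some _ _ hg
          exact congrArg some hov.symm
      have hmem : (t, old) ∈ (pvG b).items := PySem.Dict.mem_items_of_get?_eq_some _ hv
      obtain ⟨l1, l2, hdec⟩ := List.append_of_mem hmem
      have hnd : (((l1 ++ (t, old) :: l2).map (·.1)) : List String).Nodup := by
        have := pvG_nodup_keys b
        simp only [PySem.Dict.keys] at this
        rwa [hdec] at this
      rw [List.map_append, List.map_cons] at hnd
      obtain ⟨hA, hB, hdisj⟩ := List.nodup_append.mp hnd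
      have htl1 : t ∉ l1.map (·.1) := fun h => hdisj t h t List.mem_cons_self rfl
      have htl2 : t ∉ l2.map (·.1) := (List.nodup_cons.mp hB).1
      have ht1 : ∀ p ∈ l1, (p : String × List (Int × List (String × String))).1 ≠ t := by
        intro p hp hpt
        exact htl1 (hpt ▸ List.mem_map_of_mem hp)
      have ht2 : ∀ p ∈ l2, (p : String × List (Int × List (String × String))).1 ≠ t := by
        intro p hp hpt
        exact htl2 (hpt ▸ List.mem_map_of_mem hp)
      have hitems : ((pvG b).insert t (old ++ [((b.length : Int), x)])).items
          = l1 ++ (t, old ++ [((b.length : Int), x)]) :: l2 := by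
        rw [PySem.Dict.items_insert_of_contains _ _ hc, hdec]
        simp only [List.map_append, List.map_cons, BEq.rfl, if_pos]
        congr 1
        · exact List.map_congr_left (fun p hp => by
            simp [beq_iff_eq, ht1 p hp]) |>.trans (List.map_id _)
        · congr 1
          exact List.map_congr_left (fun p hp => by
            simp [beq_iff_eq, ht2 p hp]) |>.trans (List.map_id _)
      rw [hitems]
      have hwlen : pvW (t, old ++ [((b.length : Int), x)]) = pvW (t, old) ++ [w] := by
        rw [pvW_snoc]
        have hl : old.length = (b.map pvType).count t := pvG_len b t
        simp [hw, hl, add_comm]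
      simp only [List.flatMap_append, List.flatMap_cons, hwlen]
      have hperm0 : (l1.flatMap pvW ++ ((pvW (t, old) ++ [w]) ++ l2.flatMap pvW)).Perm
          ((l1.flatMap pvW ++ (pvW (t, old) ++ l2.flatMap pvW)) ++ [w]) := by
        have h1 : ([w] ++ l2.flatMap pvW).Perm (l2.flatMap pvW ++ [w]) := List.perm_append_comm
        have h2 := (h1.append_left (pvW (t, old))).append_left (l1.flatMap pvW)
        simpa [List.append_assoc] using h2
      refine hperm0.trans ?_
      have hflat : (pvG b).items.flatMap pvW
          = l1.flatMap pvW ++ (pvW (t, old) ++ l2.flatMap pvW) := by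
        rw [hdec]; simp [List.flatMap_append]
      rw [← hflat]
      exact ih.append_right [w]
    · -- t is a fresh key: its group is appended at the end
      have hcf : (pvG b).contains t = false := by simpa using hc
      have hcount : (b.map pvType).count t = 0 := by
        rw [pvG_contains] at hcf
        simp only [decide_eq_false_iff_not] at hcf
        exact List.count_eq_zero.mpr hcf
      have hgd : old = [] := by
        have := pvG_len b t
        rw [hcount] at this
        exact List.length_eq_zero_iff.mp (hold ▸ this)
      rw [PySem.Dict.items_insert_of_not_contains _ _ hcf, hgd]
      simp only [List.nil_append, List.flatMap_append, List.flatMap_cons, List.flatMap_nil,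
        List.append_nil]
      have hsingle : pvW (t, [((b.length : Int), x)]) = [w] := by
        simp [pvW, PySem.List.enumerate_cons, PySem.List.enumerate_nil, hw, hcount]
      rw [hsingle]
      exact ih.append_right [w]

theorem pvWr_fst (rest : List (List (String × String))) :
    ∀ pre i, (pvWr pre i rest).map (·.1) = List.range' i rest.length := by
  induction rest with
  | nil => intro pre i; simp [pvWr]
  | cons itemL rest ih =>
    intro pre i
    simp [pvWr, List.range'_succ, ih]

theorem pvWr_foldl_set (rest : List (List (String × String))) :
    ∀ (pre : List String) (A B : List (List (String × String))), B.length = rest.length →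
    (pvWr pre A.length rest).foldl (fun res w => res.set w.1 w.2) (A ++ B)
      = A ++ pvSpine pre rest := by
  induction rest with
  | nil =>
    intro pre A B hB
    have : B = [] := List.length_eq_zero_iff.mp hB
    simp [pvWr, pvSpine, this]
  | cons itemL rest ih =>
    intro pre A B hB
    obtain ⟨b0, B', rfl⟩ : ∃ b0 B', B = b0 :: B' := by
      cases B with
      | nil => simp at hB
      | cons b0 B' => exact ⟨b0, B', rfl⟩
    simp only [pvWr, List.foldl_cons]
    have hset : (A ++ b0 :: B').set A.length
        (pvOut (pvType itemL) ((pre.count (pvType itemL) : Int) + 1) itemL)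
        = (A ++ [pvOut (pvType itemL) ((pre.count (pvType itemL) : Int) + 1) itemL]) ++ B' := by
      rw [List.set_append]
      simp
    rw [hset]
    have hlen : (A ++ [pvOut (pvType itemL) ((pre.count (pvType itemL) : Int) + 1) itemL]).length
        = A.length + 1 := by simp
    rw [← hlen, ih (pre ++ [pvType itemL]) _ B' (by simpa using hB)]
    simp [pvSpine]

-- ===== VERDICT (by name: the statement is the Claim_ definition above) =====
theorem number_assessment_types_spec : Claim_equal_number_assessment_types := by
  intro breakdown _
  show number_assessment_types breakdown = number_assessment_types_alt breakdown
  have hA := pvA_fold breakdown [] PySem.Dict.empty []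
    (by intro s; simp [PySem.Dict.getD_empty])
    (by intro s; simp [PySem.Dict.contains_empty])
  rw [show number_assessment_types breakdown =
      ([] ++ pvSpine [] breakdown : List (List (String × String))) from hA]
  rw [pvB_writes]
  have hperm := pvG_perm breakdown
  have hnodup : (((pvG breakdown).items.flatMap pvW).map (·.1)).Nodup := by
    have : (((pvG breakdown).items.flatMap pvW).map (·.1)).Perm ((pvWr [] 0 breakdown).map (·.1)) :=
      hperm.map _
    rw [pvWr_fst] at this
    exact this.nodup_iff.mpr (List.nodup_range' )
  have hcomm : ∀ x ∈ (pvG breakdown).items.flatMap pvW, ∀ y ∈ (pvG breakdown).items.flatMap pvW,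
      ∀ (z : List (List (String × String))), (z.set x.1 x.2).set y.1 y.2 = (z.set y.1 y.2).set x.1 x.2 := by
    intro x hx y hy z
    by_cases hxy : x = y
    · subst hxy; rfl
    · have hne : x.1 ≠ y.1 := by
        intro h
        exact hxy (List.inj_on_of_nodup_map hnodup hx hy h)
      exact List.set_comm x.2 y.2 hne
  rw [hperm.foldl_eq' hcomm]
  have := pvWr_foldl_set breakdown [] [] (List.replicate breakdown.length [])
    (by simp)
  simpa using this.symm
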